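-- pv_equiv track=rewrite | github.com/ivan-v/lutik | chord_progression.py | construct_chord
-- ===== SOURCE A (Python) =====
-- def construct_chord(offset, chord_name, is_minor):
--   num_string = ''.join([i if i.isdigit() else '' for i in chord_name])
--   if num_string:
--     num = int(num_string)
--   else:
--     num = 0
--   nums = []
--   modifier = ""
--   split_up = list(chord_name)
--   for i in range(len(split_up)):
--     if split_up[i].isdigit():
--       if i < len(split_up) - 1 and split_up[i+1].isdigit():
--         nums.append((int(split_up[i] + split_up[i+1]), modifier))
--         modifier = ""
--       else:
--         nums.append((int(split_up[i]), modifier))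
--         modifier = ""
--     else:
--       if (split_up[i] == "#" or split_up[i] == "s" or split_up[i] == "b") \
--           and i > 1:
--         modifier = split_up[i]
--
--   if is_minor:
--     chord = [0, 3, 7]
--   else:
--     chord = [0, 4, 7]
--
--   if "dim" in chord_name:
--     chord = [0, 3, 6]
--   elif "aug" in chord_name:
--     chord = [0, 4, 8]
--   if nums != []:
--     if nums[0][0] == 7:
--       if is_minor:
--         chord.append(chord[-1] + 3)
--       elif "dim" in chord_name:
--         chord.append(chord[-1] + 2)
--       elif "maj" in chord_name:
--         chord.append(chord[-1] + 4)
--       else: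
--         chord.append(chord[-1] + 3)
--     elif nums[0][0] == 6:
--       chord.append(chord[-1] + 2)
--     elif nums[0][0] == 9:
--       if is_minor:
--         chord.append(chord[-1] + 3)
--       elif "dim" in chord_name:
--         chord.append(chord[-1] + 2)
--       elif "maj" in chord_name:
--         chord.append(chord[-1] + 4)
--       else:
--         chord.append(chord[-1] + 3)
--       if "maj" in chord_name:
--         chord.append(chord[-1] + 3)
--       else:
--         chord.append(chord[-1] + 4)
--     elif nums[0][0] == 11:
--       if is_minor:
--         chord.append(chord[-1] + 3)
--       elif "dim" in chord_name:
--         chord.append(chord[-1] + 2)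
--       elif "maj" in chord_name:
--         chord.append(chord[-1] + 4)
--       else:
--         chord.append(chord[-1] + 3)
--       if "maj" in chord_name:
--         chord.append(chord[-1] + 3)
--       else:
--         chord.append(chord[-1] + 4)
--       chord.append(chord[-1] + 3)
--     elif nums[0][0] == 13:
--       if is_minor:
--         chord.append(chord[-1] + 3)
--       elif "dim" in chord_name:
--         chord.append(chord[-1] + 2)
--       elif "maj" in chord_name:
--         chord.append(chord[-1] + 4)
--       else:
--         chord.append(chord[-1] + 3)
--       if "maj" in chord_name:
--         chord.append(chord[-1] + 3)
--       else:
--         chord.append(chord[-1] + 4)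
--       # Drop the 11th due to potential conflicts
--       chord.append(chord[-1] + 5)
--   for num in nums[1:]:
--     entry = int(num[0]/2)
--     if num[1] == "b":
--       chord[entry] -= 1
--     elif num[1] == "#" or num[1] == "s":
--       num[entry] += 1
--
--   return [i + offset for i in chord]
-- ===== SOURCE B (Python) =====
-- def construct_chord(offset, chord_name, is_minor):
--     s = chord_name
--     n = len(s)
--
--     # pending accidental for the digit at position j, found by scanning backwards:
--     # the nearest accidental (at an index > 1) before j, unless a digit intervenes
--     def mod_before(j):
--         k = j - 1
--         while k >= 0:
--             if s[k].isdigit():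
--                 return ""
--             if s[k] in "#sb" and k > 1:
--                 return s[k]
--             k -= 1
--         return ""
--
--     # the number read at digit position j (two digits when another digit follows,
--     # so a digit pair yields one token per position, as in the original scanner)
--     def val_at(j):
--         if j + 1 < n and s[j + 1].isdigit():
--             return int(s[j]) * 10 + int(s[j + 1])
--         return int(s[j])
--
--     nums = [(val_at(j), mod_before(j)) for j in range(n) if s[j].isdigit()]
--
--     dim = "dim" in s
--     maj = "maj" in s
--     if dim:
--         base = [0, 3, 6]
--     elif "aug" in s:
--         base = [0, 4, 8]
--     elif is_minor:
--         base = [0, 3, 7]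
--     else:
--         base = [0, 4, 7]
--
--     seventh = 3 if is_minor else 2 if dim else 4 if maj else 3
--     ninth = 3 if maj else 4
--     ext_of = {7: [seventh], 6: [2], 9: [seventh, ninth],
--               11: [seventh, ninth, 3], 13: [seventh, ninth, 5]}
--
--     # extensions as running sums appended after the base triad
--     exts = []
--     if nums:
--         acc = base[-1]
--         for inc in ext_of.get(nums[0][0], []):
--             acc += inc
--             exts.append(acc)
--     chord = base + exts
--
--     # net accidental adjustment per chord index, aggregated from the later tokens
--     def delta(i):
--         d = 0
--         for val, mod in nums[1:]:
--             if mod == "b" and val // 2 == i: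
--                 d -= 1
--             elif mod in ("#", "s") and val // 2 == i:
--                 d += 1
--         return d
--
--     return [x + offset + delta(i) for i, x in enumerate(chord)]
-- ===== Notes on version B (the rewrite author's own statement) =====
-- stated objective: alternative
-- what changed: Replaces A's stateful forward scan by a per-digit backward lookup of the pending accidental, A's five-way nested if/elif append chains by running sums over a number-to-increments table, and A's sequential in-place chord mutations by a per-index aggregated delta applied in the final enumerate pass; A's dead num_string/num pass is dropped.
import Mathlib
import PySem

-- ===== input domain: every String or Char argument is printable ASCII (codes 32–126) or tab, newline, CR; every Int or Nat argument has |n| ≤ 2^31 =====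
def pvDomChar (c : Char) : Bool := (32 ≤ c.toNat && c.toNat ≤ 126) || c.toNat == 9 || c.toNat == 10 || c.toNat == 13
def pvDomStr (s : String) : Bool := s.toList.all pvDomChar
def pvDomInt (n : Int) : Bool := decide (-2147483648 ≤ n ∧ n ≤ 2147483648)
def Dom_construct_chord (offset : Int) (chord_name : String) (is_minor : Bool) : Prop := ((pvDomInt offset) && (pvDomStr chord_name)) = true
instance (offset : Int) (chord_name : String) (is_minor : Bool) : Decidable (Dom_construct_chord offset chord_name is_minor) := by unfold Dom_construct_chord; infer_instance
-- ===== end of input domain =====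

-- B replaces A's stateful forward scan by a per-digit backward lookup of the pending accidental,
-- A's five-way nested append chains by running sums over a number→increments table, and A's
-- sequential chord mutations by a per-index aggregated delta; A's dead num_string pass is dropped
-- (objective: alternative — a different decomposition of the same O(n) task).

-- ===== PORT A =====
-- Python: the 'for i in range(len(split_up))' tokenizing loop of A.
-- Char.isDigit = str.isdigit on the ASCII domain; int(<digit chars>) is computed as the exact digit arithmetic.
def pvParseLoop (s : List Char) : Nat → Nat → List (Int × String) → String → List (Int × String)
  | 0, _, nums, _ => nums
  | fuel + 1, i, nums, modifier =>
    if i < s.length then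
      let c := s.getD i ' '                 -- split_up[i], in range here
      if c.isDigit then
        if i < s.length - 1 ∧ (s.getD (i + 1) ' ').isDigit then
          -- s.getD (i+1) ' ' = split_up[i+1]: in range here thanks to the guard
          pvParseLoop s fuel (i + 1)
            (nums ++ [(((c.toNat : Int) - 48) * 10 + (((s.getD (i + 1) ' ').toNat : Int) - 48), modifier)]) ""
        else
          pvParseLoop s fuel (i + 1) (nums ++ [((c.toNat : Int) - 48, modifier)]) ""
      else
        if (c = '#' ∨ c = 's' ∨ c = 'b') ∧ i > 1 then
          pvParseLoop s fuel (i + 1) nums (String.ofList [c])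
        else
          pvParseLoop s fuel (i + 1) nums modifier
    else nums

def pvParseNums (chord_name : String) : List (Int × String) :=
  pvParseLoop chord_name.toList chord_name.toList.length 0 [] ""

-- int(num_string) for a nonempty all-digit string (the only way A reaches it)
abbrev pvDigitsVal (l : List Char) : Int :=
  l.foldl (fun a c => a * 10 + ((c.toNat : Int) - 48)) 0

def construct_chord (offset : Int) (chord_name : String) (is_minor : Bool) : List Int :=
  -- num_string / num are computed and never used by A (num is shadowed by the final loop); kept as unused lets
  let num_string := chord_name.toList.filterMap (fun i => if i.isDigit then some i else none)
  let _num : Int := if num_string ≠ [] then pvDigitsVal num_string else 0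
  let nums := pvParseNums chord_name
  let chord : List Int := if is_minor then [0, 3, 7] else [0, 4, 7]
  let chord :=
    if PySem.Str.isIn "dim" chord_name then [0, 3, 6]
    else if PySem.Str.isIn "aug" chord_name then [0, 4, 8]
    else chord
  let chord :=
    if nums ≠ [] then
      if (nums.headD (0, "")).1 = 7 then
        chord ++ [chord.getLastD 0 +
          (if is_minor then 3 else if PySem.Str.isIn "dim" chord_name then 2
           else if PySem.Str.isIn "maj" chord_name then 4 else 3)]
      else if (nums.headD (0, "")).1 = 6 then
        chord ++ [chord.getLastD 0 + 2]
      else if (nums.headD (0, "")).1 = 9 then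
        let chord := chord ++ [chord.getLastD 0 +
          (if is_minor then 3 else if PySem.Str.isIn "dim" chord_name then 2
           else if PySem.Str.isIn "maj" chord_name then 4 else 3)]
        chord ++ [chord.getLastD 0 + (if PySem.Str.isIn "maj" chord_name then 3 else 4)]
      else if (nums.headD (0, "")).1 = 11 then
        let chord := chord ++ [chord.getLastD 0 +
          (if is_minor then 3 else if PySem.Str.isIn "dim" chord_name then 2
           else if PySem.Str.isIn "maj" chord_name then 4 else 3)]
        let chord := chord ++ [chord.getLastD 0 + (if PySem.Str.isIn "maj" chord_name then 3 else 4)]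
        chord ++ [chord.getLastD 0 + 3]
      else if (nums.headD (0, "")).1 = 13 then
        let chord := chord ++ [chord.getLastD 0 +
          (if is_minor then 3 else if PySem.Str.isIn "dim" chord_name then 2
           else if PySem.Str.isIn "maj" chord_name then 4 else 3)]
        let chord := chord ++ [chord.getLastD 0 + (if PySem.Str.isIn "maj" chord_name then 3 else 4)]
        chord ++ [chord.getLastD 0 + 5]
      else chord
    else chord
  let chord :=
    (nums.drop 1).foldl (fun ch p =>
      -- entry = int(num[0]/2); p.1 is a parsed 0..99 number, so this is exact
      if p.2 = "b" then ch.modify (p.1 / 2).toNat (· - 1)   -- chord[entry] -= 1 (IndexError out of range: outside Pre_)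
      else if p.2 = "#" ∨ p.2 = "s" then ch                 -- Python raises here (num[entry] += 1 on a tuple): outside Pre_
      else ch) chord
  chord.map (fun i => i + offset)

-- ===== PORT B =====
-- Python Source B: mod_before(j) — backward while loop over k = j-1, j-2, …
def pvModBefore (s : List Char) : Nat → String
  | 0 => ""
  | k + 1 =>
    let c := s.getD k ' '
    if c.isDigit then ""
    else if (c = '#' ∨ c = 's' ∨ c = 'b') ∧ k > 1 then String.ofList [c]
    else pvModBefore s k

-- Python Source B: val_at(j)
def pvValAtB (s : List Char) (j : Nat) : Int :=
  if j + 1 < s.length ∧ (s.getD (j + 1) ' ').isDigit then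
    (((s.getD j ' ').toNat : Int) - 48) * 10 + (((s.getD (j + 1) ' ').toNat : Int) - 48)
  else ((s.getD j ' ').toNat : Int) - 48

-- one entry of Source B's comprehension: the token at position j, when j holds a digit
def pvTok (s : List Char) (j : Nat) : Option (Int × String) :=
  if (s.getD j ' ').isDigit then some (pvValAtB s j, pvModBefore s j) else none

-- Python Source B: delta(i) — the aggregation loop over nums[1:]
def pvDelta (t : List (Int × String)) (i : Int) : Int :=
  t.foldl (fun d p =>
    if p.2 = "b" ∧ PySem.Int.floordiv p.1 2 = i then d - 1
    else if (p.2 = "#" ∨ p.2 = "s") ∧ PySem.Int.floordiv p.1 2 = i then d + 1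
    else d) 0

def construct_chord_alt (offset : Int) (chord_name : String) (is_minor : Bool) : List Int :=
  let s := chord_name.toList
  let nums := (List.range s.length).filterMap (pvTok s)
  let dim := PySem.Str.isIn "dim" chord_name
  let maj := PySem.Str.isIn "maj" chord_name
  let base : List Int :=
    if dim then [0, 3, 6]
    else if PySem.Str.isIn "aug" chord_name then [0, 4, 8]
    else if is_minor then [0, 3, 7]
    else [0, 4, 7]
  let seventh : Int := if is_minor then 3 else if dim then 2 else if maj then 4 else 3
  let ninth : Int := if maj then 3 else 4
  let ext_of : PySem.Dict Int (List Int) :=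
    ((((PySem.Dict.empty.insert 7 [seventh]).insert 6 [2]).insert 9 [seventh, ninth]).insert
        11 [seventh, ninth, 3]).insert 13 [seventh, ninth, 5]
  -- extensions as running sums (the 'acc'/'exts' loop of Source B), then base + exts
  let exts : List Int :=
    match nums with
    | [] => []
    | (v, _) :: _ =>
      ((ext_of.getD v []).foldl
        (fun (q : List Int × Int) inc => (q.1 ++ [q.2 + inc], q.2 + inc))
        ([], base.getLastD 0)).1
  let chord := base ++ exts
  -- [x + offset + delta(i) for i, x in enumerate(chord)]
  chord.mapIdx (fun i x => x + offset + pvDelta (nums.drop 1) (i : Int))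

-- ===== PRECONDITION & SPEC =====
-- position j of l holds a digit (getD: positions beyond the end read as ' ', a non-digit)
abbrev pvDigit (l : List Char) (j : Nat) : Prop := (l.getD j ' ').isDigit = true

-- no digit and no accidental character strictly between positions a and b
abbrev pvClean (l : List Char) (a b : Nat) : Prop :=
  ∀ k < b, a < k →
    ¬ pvDigit l k ∧ ¬(l.getD k ' ' = '#' ∨ l.getD k ' ' = 's' ∨ l.getD k ' ' = 'b')

-- the digit at position j is preceded (after the last digit/accidental) by a '#'/'s' at some
-- position i > 1 — the scanner's pending modifier at j is "#" or "s"
abbrev pvSharpMod (l : List Char) (j : Nat) : Prop :=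
  ∃ i < j, 1 < i ∧ (l.getD i ' ' = '#' ∨ l.getD i ' ' = 's') ∧ pvClean l i j

-- likewise with a 'b': the pending modifier at j is "b"
abbrev pvFlatMod (l : List Char) (j : Nat) : Prop :=
  ∃ i < j, 1 < i ∧ l.getD i ' ' = 'b' ∧ pvClean l i j

-- the number the scanner reads at digit position j (two digits when another follows)
def pvValAt (l : List Char) (j : Nat) : Int :=
  if (l.getD (j + 1) ' ').isDigit then
    (((l.getD j ' ').toNat : Int) - 48) * 10 + (((l.getD (j + 1) ' ').toNat : Int) - 48)
  else ((l.getD j ' ').toNat : Int) - 48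

-- length of A's chord list just before its final modifier loop: 3 base notes plus the
-- extensions chosen by the number read at the first digit position
def pvChordLen (l : List Char) : Int :=
  match l.findIdx? (·.isDigit) with
  | none => 3
  | some j0 =>
    3 + (if pvValAt l j0 = 7 ∨ pvValAt l j0 = 6 then 1
         else if pvValAt l j0 = 9 then 2
         else if pvValAt l j0 = 11 ∨ pvValAt l j0 = 13 then 3 else 0)

-- Pre_ excludes exactly the inputs on which Python A raises: a digit after the first number whose
-- pending accidental is '#'/'s' (A's `num[entry] += 1` indexes/assigns into a tuple: IndexError or
-- TypeError), or 'b' with entry = number//2 not below A's chord length (IndexError). A returns on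
-- every other input.
def Pre_construct_chord (offset : Int) (chord_name : String) (is_minor : Bool) : Prop :=
  ∀ j < chord_name.toList.length, pvDigit chord_name.toList j →
    (∃ d < j, pvDigit chord_name.toList d) →
      ¬ pvSharpMod chord_name.toList j ∧
        (pvFlatMod chord_name.toList j →
          pvValAt chord_name.toList j / 2 < pvChordLen chord_name.toList)
instance (offset : Int) (chord_name : String) (is_minor : Bool) :
    Decidable (Pre_construct_chord offset chord_name is_minor) := by
  unfold Pre_construct_chord
  refine @Nat.decidableBallLT _ _ (fun j hj => ?_)
  haveI : Decidable (pvSharpMod chord_name.toList j) := by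
    unfold pvSharpMod pvClean pvDigit; infer_instance
  haveI : Decidable (pvFlatMod chord_name.toList j) := by
    unfold pvFlatMod pvClean pvDigit; infer_instance
  unfold pvDigit
  infer_instance

def pvWitness_construct_chord : Int × String × Bool := (0, "Cmaj7", false)

def Spec_construct_chord (offset : Int) (chord_name : String) (is_minor : Bool) (out : List Int) : Prop := out = construct_chord_alt offset chord_name is_minor
instance (offset : Int) (chord_name : String) (is_minor : Bool) (out : List Int) : Decidable (Spec_construct_chord offset chord_name is_minor out) := by unfold Spec_construct_chord; infer_instance

-- ===== CLAIM (what is proved, stated in full; the proofs are below) =====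
def Claim_equal_construct_chord : Prop := ∀ (offset : Int) (chord_name : String) (is_minor : Bool), Dom_construct_chord offset chord_name is_minor → Pre_construct_chord offset chord_name is_minor → Spec_construct_chord offset chord_name is_minor (construct_chord offset chord_name is_minor)

-- ===== LEMMAS AND PROOFS =====

-- (L1) A's forward scan, started at i with the pending modifier that B's backward
-- lookup computes at i, emits exactly B's tokens for positions i, i+1, …
theorem pvParse_char (s : List Char) :
    ∀ (fuel i : Nat) (nums : List (Int × String)), s.length - i ≤ fuel →
      pvParseLoop s fuel i nums (pvModBefore s i)
        = nums ++ (List.range' i (s.length - i)).filterMap (pvTok s) := by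
  intro fuel
  induction fuel with
  | zero =>
    intro i nums h
    have : s.length - i = 0 := by omega
    simp [pvParseLoop, this]
  | succ fuel ih =>
    intro i nums h
    rw [pvParseLoop]
    have hunf : ∀ k, pvModBefore s (k+1) = (if (s.getD k ' ').isDigit then "" else if (s.getD k ' ' = '#' ∨ s.getD k ' ' = 's' ∨ s.getD k ' ' = 'b') ∧ k > 1 then String.ofList [s.getD k ' '] else pvModBefore s k) := fun k => rfl
    by_cases hi : i < s.length
    · have hr : s.length - i = (s.length - (i+1)) + 1 := by omega
      have hrange : (List.range' i (s.length - i)).filterMap (pvTok s)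
          = (pvTok s i).toList ++ (List.range' (i+1) (s.length - (i+1))).filterMap (pvTok s) := by
        rw [hr, List.range'_succ, List.filterMap_cons]
        cases hx : pvTok s i <;> simp [hx]
      simp only [if_pos hi]
      by_cases hdig : (s.getD i ' ').isDigit
      · have hmb : pvModBefore s (i + 1) = "" := by
          rw [hunf, if_pos hdig]
        have htok : pvTok s i = some (pvValAtB s i, pvModBefore s i) := by
          rw [pvTok, if_pos hdig]
        by_cases h2 : i < s.length - 1 ∧ (s.getD (i + 1) ' ').isDigit
        · have hv : pvValAtB s i
              = (((s.getD i ' ').toNat : Int) - 48) * 10 + (((s.getD (i + 1) ' ').toNat : Int) - 48) := by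
            rw [pvValAtB, if_pos ⟨by omega, h2.2⟩]
          simp only [hdig, if_true, if_pos h2]
          rw [← hmb, ih (i+1) _ (by omega), hrange, htok, hv]
          simp
        · have hv : pvValAtB s i = ((s.getD i ' ').toNat : Int) - 48 := by
            rw [pvValAtB, if_neg]
            intro ⟨ha, hb⟩; exact h2 ⟨by omega, hb⟩
          simp only [hdig, if_true, if_neg h2]
          rw [← hmb, ih (i+1) _ (by omega), hrange, htok, hv]
          simp
      · have htok : pvTok s i = none := by
          rw [pvTok, if_neg hdig]
        simp only [hdig, Bool.false_eq_true, if_false]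
        rw [hrange, htok]
        split
        · rename_i hcond
          have hmb : pvModBefore s (i + 1) = String.ofList [s.getD i ' '] := by
            rw [hunf, if_neg hdig, if_pos hcond]
          rw [← hmb, ih (i+1) _ (by omega)]
          simp
        · rename_i hcond
          have hmb : pvModBefore s (i + 1) = pvModBefore s i := by
            rw [hunf, if_neg hdig, if_neg hcond]
          rw [← hmb, ih (i+1) _ (by omega)]
          simp
    · have : s.length - i = 0 := by omega
      simp [this, if_neg hi]


theorem pvParseNums_eq (chord_name : String) :
    pvParseNums chord_name
      = (List.range chord_name.toList.length).filterMap (pvTok chord_name.toList) := by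
  have h := pvParse_char chord_name.toList chord_name.toList.length 0 [] (by omega)
  have h0 : pvModBefore chord_name.toList 0 = "" := rfl
  rw [h0] at h
  rw [pvParseNums, h, List.range_eq_range']
  simp

-- (L2) the backward lookup yields "", "b", or a sharp that pvSharpMod certifies
theorem pvModBefore_cases (s : List Char) (j : Nat) :
    pvModBefore s j = "" ∨ pvModBefore s j = "b" ∨
      ((pvModBefore s j = "#" ∨ pvModBefore s j = "s") ∧ pvSharpMod s j) := by
  have hunf : ∀ k, pvModBefore s (k+1) = (if (s.getD k ' ').isDigit then "" else if (s.getD k ' ' = '#' ∨ s.getD k ' ' = 's' ∨ s.getD k ' ' = 'b') ∧ k > 1 then String.ofList [s.getD k ' '] else pvModBefore s k) := fun _ => rfl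
  induction j with
  | zero => exact Or.inl rfl
  | succ k ih =>
    rw [hunf]
    by_cases hdig : (s.getD k ' ').isDigit
    · rw [if_pos hdig]; exact Or.inl rfl
    · rw [if_neg hdig]
      by_cases hcond : (s.getD k ' ' = '#' ∨ s.getD k ' ' = 's' ∨ s.getD k ' ' = 'b') ∧ k > 1
      · rw [if_pos hcond]
        obtain ⟨hc, hk⟩ := hcond
        rcases hc with hc | hc | hc
        · refine Or.inr (Or.inr ⟨Or.inl (by rw [hc]), k, Nat.lt_succ_self k, hk, Or.inl hc,
            fun k' hk' hkk' => by omega⟩)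
        · refine Or.inr (Or.inr ⟨Or.inr (by rw [hc]), k, Nat.lt_succ_self k, hk, Or.inr hc,
            fun k' hk' hkk' => by omega⟩)
        · exact Or.inr (Or.inl (by rw [hc]))
      · rw [if_neg hcond]
        rcases ih with h | h | ⟨hs, i, hij, h1i, hacc, hclean⟩
        · exact Or.inl h
        · exact Or.inr (Or.inl h)
        · refine Or.inr (Or.inr ⟨hs, i, by omega, h1i, hacc, ?_⟩)
          intro k' hk' hik'
          by_cases hki : k' < k
          · exact hclean k' hki hik'
          · have : k' = k := by omega
            subst this
            refine ⟨hdig, fun hacc2 => hcond ⟨hacc2, by omega⟩⟩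


-- digit characters have codes 48–57
theorem pvDigit_code {c : Char} (h : c.isDigit = true) : 48 ≤ c.toNat ∧ c.toNat ≤ 57 := by
  simp only [Char.isDigit, Bool.and_eq_true, decide_eq_true_eq, Char.le_def,
    UInt32.le_iff_toNat_le] at h
  unfold Char.toNat
  exact h


-- every token after the first comes from a digit position with an earlier digit
theorem pvTail_mem (s : List Char) (p : Int × String)
    (hp : p ∈ ((List.range s.length).filterMap (pvTok s)).drop 1) :
    ∃ j < s.length, pvDigit s j ∧ (∃ d < j, pvDigit s d)
      ∧ p = (pvValAtB s j, pvModBefore s j) := by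
  by_cases hex : ∃ j, j < s.length ∧ pvDigit s j
  · set j0 := Nat.find hex with hj0
    obtain ⟨hj0n, hj0d⟩ := Nat.find_spec hex
    have hmin : ∀ a, a < j0 → pvTok s a = none := by
      intro a ha
      have := Nat.find_min hex ha
      rw [pvTok, if_neg]
      intro hd
      exact this ⟨by omega, hd⟩
    have hsplit : List.range s.length
        = List.range' 0 j0 ++ (j0 :: List.range' (j0 + 1) (s.length - j0 - 1)) := by
      rw [List.range_eq_range']
      rw [show s.length = j0 + ((s.length - j0 - 1) + 1) from by omega]
      rw [← List.range'_append_1, List.range'_succ]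
      simp
    have hnil : (List.range' 0 j0).filterMap (pvTok s) = [] := by
      rw [List.filterMap_eq_nil_iff]
      intro a ha
      exact hmin a (by have := List.mem_range'_1.mp ha; omega)
    have htok0 : pvTok s j0 = some (pvValAtB s j0, pvModBefore s j0) := by
      rw [pvTok, if_pos hj0d]
    rw [hsplit, List.filterMap_append, hnil, List.nil_append, List.filterMap_cons, htok0] at hp
    simp only [List.drop_succ_cons, List.drop_zero] at hp
    obtain ⟨j, hjr, hjtok⟩ := List.mem_filterMap.mp hp
    have hjb := List.mem_range'_1.mp hjr
    have hjd : pvDigit s j := by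
      by_contra hnd
      rw [pvTok, if_neg hnd] at hjtok
      simp at hjtok
    rw [pvTok, if_pos hjd] at hjtok
    exact ⟨j, by omega, hjd, ⟨j0, by omega, hj0d⟩, (Option.some_inj.mp hjtok).symm⟩
  · -- no digit: the token list is empty
    exfalso
    have : (List.range s.length).filterMap (pvTok s) = [] := by
      rw [List.filterMap_eq_nil_iff]
      intro a ha
      rw [pvTok, if_neg]
      intro hd
      exact hex ⟨a, List.mem_range.mp ha, hd⟩
    rw [this] at hp
    simp at hp

theorem pvValAtB_nonneg (s : List Char) (j : Nat) (h : pvDigit s j) : 0 ≤ pvValAtB s j := by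
  rw [pvValAtB]
  obtain ⟨h1, h2⟩ := pvDigit_code h
  split
  · rename_i hc
    obtain ⟨h3, h4⟩ := pvDigit_code hc.2
    omega
  · omega


def pvContrib (p : Int × String) (i : Int) : Int :=
  if p.2 = "b" ∧ PySem.Int.floordiv p.1 2 = i then -1
  else if (p.2 = "#" ∨ p.2 = "s") ∧ PySem.Int.floordiv p.1 2 = i then 1
  else 0

theorem pvDelta_eq_sum (t : List (Int × String)) (i : Int) :
    pvDelta t i = (t.map (pvContrib · i)).sum := by
  unfold pvDelta
  have hf : (fun (d : Int) (p : Int × String) =>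
      if p.2 = "b" ∧ PySem.Int.floordiv p.1 2 = i then d - 1
      else if (p.2 = "#" ∨ p.2 = "s") ∧ PySem.Int.floordiv p.1 2 = i then d + 1
      else d) = fun d p => d + pvContrib p i := by
    funext d p
    unfold pvContrib
    split_ifs <;> ring
  rw [hf, PySem.List.foldl_add]
  ring

theorem pvDelta_cons (p : Int × String) (r : List (Int × String)) (i : Int) :
    pvDelta (p :: r) i = pvContrib p i + pvDelta r i := by
  rw [pvDelta_eq_sum, pvDelta_eq_sum, List.map_cons, List.sum_cons]

theorem pvExt_aux (incs : List Int) :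
    ∀ (L E : List Int),
    L ++ ((incs.foldl (fun (q : List Int × Int) inc => (q.1 ++ [q.2 + inc], q.2 + inc))
            (E, (L ++ E).getLastD 0)).1)
      = incs.foldl (fun ch inc => ch ++ [ch.getLastD 0 + inc]) (L ++ E) := by
  induction incs with
  | nil => intro L E; simp
  | cons inc r ih =>
    intro L E
    simp only [List.foldl_cons]
    have h1 : (L ++ E).getLastD 0 + inc = (L ++ (E ++ [(L ++ E).getLastD 0 + inc])).getLastD 0 := by
      rw [← List.append_assoc]
      simp
    calc L ++ (r.foldl (fun q inc => (q.1 ++ [q.2 + inc], q.2 + inc))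
            (E ++ [(L ++ E).getLastD 0 + inc], (L ++ E).getLastD 0 + inc)).1
        = L ++ (r.foldl (fun q inc => (q.1 ++ [q.2 + inc], q.2 + inc))
            (E ++ [(L ++ E).getLastD 0 + inc],
              (L ++ (E ++ [(L ++ E).getLastD 0 + inc])).getLastD 0)).1 := by rw [← h1]
      _ = r.foldl (fun ch inc => ch ++ [ch.getLastD 0 + inc]) (L ++ (E ++ [(L ++ E).getLastD 0 + inc])) := ih L _
      _ = r.foldl (fun ch inc => ch ++ [ch.getLastD 0 + inc]) ((L ++ E) ++ [(L ++ E).getLastD 0 + inc]) := by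
            rw [List.append_assoc]

theorem pvExt_eq (incs : List Int) (L : List Int) :
    L ++ ((incs.foldl (fun (q : List Int × Int) inc => (q.1 ++ [q.2 + inc], q.2 + inc))
            ([], L.getLastD 0)).1)
      = incs.foldl (fun ch inc => ch ++ [ch.getLastD 0 + inc]) L := by
  have := pvExt_aux incs L []
  simpa using this

-- (L5) A's if/elif append chain equals the table-driven append fold, for any base chord C
theorem pvMid_eq (C : List Int) (S N : Int) (v : Int) :
    (if v = 7 then C ++ [C.getLastD 0 + S]
     else if v = 6 then C ++ [C.getLastD 0 + 2]
     else if v = 9 then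
       (C ++ [C.getLastD 0 + S]) ++ [(C ++ [C.getLastD 0 + S]).getLastD 0 + N]
     else if v = 11 then
       ((C ++ [C.getLastD 0 + S]) ++ [(C ++ [C.getLastD 0 + S]).getLastD 0 + N]) ++
         [(((C ++ [C.getLastD 0 + S]) ++ [(C ++ [C.getLastD 0 + S]).getLastD 0 + N])).getLastD 0 + 3]
     else if v = 13 then
       ((C ++ [C.getLastD 0 + S]) ++ [(C ++ [C.getLastD 0 + S]).getLastD 0 + N]) ++
         [(((C ++ [C.getLastD 0 + S]) ++ [(C ++ [C.getLastD 0 + S]).getLastD 0 + N])).getLastD 0 + 5]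
     else C)
    = ((((((PySem.Dict.empty.insert 7 [S]).insert 6 [2]).insert 9 [S, N]).insert
          11 [S, N, 3]).insert 13 [S, N, 5] : PySem.Dict Int (List Int)).getD v []).foldl
        (fun ch inc => ch ++ [ch.getLastD 0 + inc]) C := by
  have dsimp : ∀ w : Int,
      ((((((PySem.Dict.empty.insert 7 [S]).insert 6 [2]).insert 9 [S, N]).insert
          11 [S, N, 3]).insert 13 [S, N, 5] : PySem.Dict Int (List Int)).getD w []) =
        if w = 7 then [S] else if w = 6 then [2] else if w = 9 then [S, N]
        else if w = 11 then [S, N, 3] else if w = 13 then [S, N, 5] else [] := by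
    intro w
    by_cases h7 : w = 7 <;> by_cases h6 : w = 6 <;> by_cases h9 : w = 9 <;>
      by_cases h11 : w = 11 <;> by_cases h13 : w = 13 <;>
        simp_all [PySem.Dict.getD_insert_of_ne, PySem.Dict.getD_insert_self,
          PySem.Dict.getD_empty]
  rw [dsimp]
  by_cases h7 : v = 7 <;> by_cases h6 : v = 6 <;> by_cases h9 : v = 9 <;>
    by_cases h11 : v = 11 <;> by_cases h13 : v = 13 <;>
      simp_all [List.foldl]

-- (L6) A's sequential modify fold then (+offset) map = B's per-index delta map,
-- when every token has modifier "" or "b" and a nonnegative value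
theorem pvMod_eq (offset : Int) :
    ∀ (t : List (Int × String)), (∀ p ∈ t, (p.2 = "" ∨ p.2 = "b") ∧ 0 ≤ p.1) →
    ∀ (L : List Int),
    (t.foldl (fun ch p =>
        if p.2 = "b" then ch.modify (p.1 / 2).toNat (· - 1)
        else if p.2 = "#" ∨ p.2 = "s" then ch
        else ch) L).map (fun i => i + offset)
      = L.mapIdx (fun i x => x + offset + pvDelta t (i : Int)) := by
  intro t
  induction t with
  | nil =>
    intro _ L
    apply List.ext_getElem (by simp)
    intro n h1 h2
    simp [pvDelta]
  | cons p r ih =>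
    intro h L
    have hp := h p (by simp)
    have hr : ∀ q ∈ r, (q.2 = "" ∨ q.2 = "b") ∧ 0 ≤ q.1 := fun q hq => h q (by simp [hq])
    simp only [List.foldl_cons]
    rcases hp.1 with hm | hm
    · -- modifier "": no-op step, zero contribution
      rw [if_neg (by simp [hm]), if_neg (by simp [hm]), ih hr L]
      apply List.ext_getElem (by simp)
      intro n h1 h2
      have hc : pvContrib p (n : Int) = 0 := by
        unfold pvContrib
        rw [if_neg (by simp [hm]), if_neg (by simp [hm])]
      simp [pvDelta_cons, hc]
    · -- modifier "b": modify at e ↔ -1 contribution at e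
      have hfd : PySem.Int.floordiv p.1 2 = (((p.1 / 2).toNat : Nat) : Int) := by
        rw [PySem.Int.floordiv_eq_ediv_of_pos (by omega), Int.toNat_of_nonneg
          (Int.ediv_nonneg hp.2 (by omega))]
      rw [if_pos hm, ih hr _]
      apply List.ext_getElem (by simp)
      intro n h1 h2
      have hc : pvContrib p (n : Int)
          = if (p.1 / 2).toNat = n then (-1 : Int) else 0 := by
        unfold pvContrib
        by_cases he : (p.1 / 2).toNat = n
        · rw [if_pos ⟨hm, by rw [hfd, he]⟩, if_pos he]
        · rw [if_neg, if_neg, if_neg he]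
          · rintro ⟨h', hfd'⟩
            rw [hm] at h'; simp at h'
          · rintro ⟨-, hfd'⟩
            exact he (by exact_mod_cast hfd ▸ hfd')
      simp only [List.getElem_mapIdx, List.getElem_modify, pvDelta_cons, hc]
      by_cases he : (p.1 / 2).toNat = n <;> simp [he] <;> ring


theorem construct_chord_spec : Claim_equal_construct_chord := by
  intro offset chord_name is_minor _ hpre
  unfold Spec_construct_chord construct_chord construct_chord_alt
  dsimp only
  have hmods : ∀ p ∈ ((List.range chord_name.toList.length).filterMap
      (pvTok chord_name.toList)).drop 1, (p.2 = "" ∨ p.2 = "b") ∧ 0 ≤ p.1 := by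
    intro p hp
    obtain ⟨j, hj, hjd, hprev, hpe⟩ := pvTail_mem chord_name.toList p hp
    have hnp := (hpre j hj hjd hprev).1
    refine ⟨?_, by rw [hpe]; exact pvValAtB_nonneg _ _ hjd⟩
    rw [hpe]
    rcases pvModBefore_cases chord_name.toList j with h | h | ⟨_, hsh⟩
    · exact Or.inl h
    · exact Or.inr h
    · exact absurd hsh hnp
  rw [pvParseNums_eq]
  cases hns : (List.range chord_name.toList.length).filterMap (pvTok chord_name.toList) with
  | nil =>
    have h0 := pvMod_eq offset [] (by simp)
      (if PySem.Str.isIn "dim" chord_name then ([0, 3, 6] : List Int)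
       else if PySem.Str.isIn "aug" chord_name then [0, 4, 8]
       else if is_minor then [0, 3, 7] else [0, 4, 7])
    simp only [List.foldl_nil] at h0
    simpa using h0
  | cons hd tl =>
    obtain ⟨v, m⟩ := hd
    rw [hns] at hmods
    simp only [List.drop_succ_cons, List.drop_zero] at hmods
    simp only [List.headD_cons, List.drop_succ_cons, List.drop_zero, ne_eq,
      reduceCtorEq, not_false_eq_true, if_true]
    rw [pvMod_eq offset tl hmods]
    rw [pvExt_eq, ← pvMid_eq]
    rfl
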